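-- pv_equiv track=rewrite | github.com/Caionickpi/aqw-discord-bot | bot.py | build_field_value
-- ===== SOURCE A (Python) =====
-- def build_field_value(lines: list[str], fallback: str = "Nenhum dado encontrado.", limit: int = 1024) -> str:
--     if not lines:
--         return fallback
--
--     selected: list[str] = []
--     current = 0
--     total = len(lines)
--
--     for index, line in enumerate(lines):
--         addition = len(line) + (1 if selected else 0)
--         if current + addition > limit:
--             remaining = total - index
--             suffix = f"- ... e mais {remaining} linha(s)"
--             if selected and len("\n".join(selected + [suffix])) <= limit:
--                 selected.append(suffix)
--             break
--
--         selected.append(line)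
--         current += addition
--
--     return "\n".join(selected) if selected else fallback
-- ===== SOURCE B (Python) =====
-- def build_field_value(lines: list[str], fallback: str = "Nenhum dado encontrado.", limit: int = 1024) -> str:
--     if not lines:
--         return fallback
--
--     # prefix table: cum[k] = len("\n".join(lines[:k+1])) + 1
--     cum = []
--     t = 0
--     for line in lines:
--         t += len(line) + 1
--         cum.append(t)
--
--     # binary search (bisect_right) for the cutoff: number of leading lines
--     # whose joined length stays <= limit, exploiting monotonicity of cum
--     lo, hi = 0, len(lines)
--     while lo < hi:
--         mid = (lo + hi) // 2
--         if cum[mid] <= limit + 1: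
--             lo = mid + 1
--         else:
--             hi = mid
--     cutoff = lo
--
--     selected = lines[:cutoff]
--     if cutoff < len(lines) and selected:
--         suffix = f"- ... e mais {len(lines) - cutoff} linha(s)"
--         if cum[cutoff - 1] + len(suffix) <= limit:
--             selected = selected + [suffix]
--     return "\n".join(selected) if selected else fallback
-- ===== Notes on version B (the rewrite author's own statement) =====
-- stated objective: alternative
-- what changed: Replaces A's single greedy scan with in-loop break/suffix logic by a precomputed prefix-length table plus a binary search (bisect_right) over it for the cutoff index, then slicing and one closed-form suffix-fit test against the table.
import Mathlib
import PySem

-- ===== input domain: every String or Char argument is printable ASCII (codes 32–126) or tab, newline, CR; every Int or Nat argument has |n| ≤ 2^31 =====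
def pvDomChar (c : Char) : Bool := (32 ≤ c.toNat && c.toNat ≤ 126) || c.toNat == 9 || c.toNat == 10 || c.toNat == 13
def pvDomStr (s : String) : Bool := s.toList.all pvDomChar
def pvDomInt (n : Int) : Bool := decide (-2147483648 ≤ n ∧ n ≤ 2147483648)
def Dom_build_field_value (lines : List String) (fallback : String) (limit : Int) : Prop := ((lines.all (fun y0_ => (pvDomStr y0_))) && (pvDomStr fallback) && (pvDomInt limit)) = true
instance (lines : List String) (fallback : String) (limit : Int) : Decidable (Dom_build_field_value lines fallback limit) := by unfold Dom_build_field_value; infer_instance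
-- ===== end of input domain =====

-- B replaces A's greedy scan (running total, in-loop break and suffix handling) by a
-- precomputed prefix-length table plus a binary search for the cutoff; alternative
-- decomposition, same result (return value only; neither mutates its arguments).

-- ===== PORT A =====
-- the for-loop of A over enumerate(lines): state (selected, current), break modelled by returning
def bfvLoopA (limit total : Int) : List (Int × String) → List String → Int → List String
  | [], selected, _ => selected
  | (index, line) :: rest, selected, current =>
    let addition := PySem.Str.len line + (if selected = [] then 0 else 1)
    if current + addition > limit then
      let suffix := "- ... e mais " ++ PySem.Int.toStr (total - index) ++ " linha(s)"
      if selected ≠ [] ∧ PySem.Str.len (PySem.Str.join "\n" (selected ++ [suffix])) ≤ limit then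
        selected ++ [suffix]
      else selected
    else bfvLoopA limit total rest (selected ++ [line]) (current + addition)

def build_field_value (lines : List String) (fallback : String) (limit : Int) : String :=
  if lines = [] then fallback
  else
    let selected := bfvLoopA limit (PySem.List.len lines) (PySem.List.enumerate lines 0) [] 0
    if selected = [] then fallback else PySem.Str.join "\n" selected

-- ===== PORT B =====
-- prefix table: bfvCum lines t = running totals t + len(line) + 1
def bfvCum : List String → Int → List Int
  | [], _ => []
  | line :: rest, t =>
    let t' := t + PySem.Str.len line + 1
    t' :: bfvCum rest t'

-- hand-written binary search from Source B (while lo < hi); fuel = initial interval size bounds the iterations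
def bfvSearch (cum : List Int) (target : Int) : Nat → Int → Int → Int
  | 0, lo, _ => lo
  | fuel + 1, lo, hi =>
    if lo < hi then
      let mid := PySem.Int.floordiv (lo + hi) 2
      if PySem.List.pyGetD cum mid 0 ≤ target then
        bfvSearch cum target fuel (mid + 1) hi
      else
        bfvSearch cum target fuel lo mid
    else lo

def build_field_value_alt (lines : List String) (fallback : String) (limit : Int) : String :=
  if lines = [] then fallback
  else
    let cum := bfvCum lines 0
    let cutoff := bfvSearch cum (limit + 1) lines.length 0 (PySem.List.len lines)
    let sel0 := PySem.List.slice lines none (some cutoff)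
    let selected :=
      if cutoff < PySem.List.len lines ∧ sel0 ≠ [] then
        let suffix := "- ... e mais " ++ PySem.Int.toStr (PySem.List.len lines - cutoff) ++ " linha(s)"
        if PySem.List.pyGetD cum (cutoff - 1) 0 + PySem.Str.len suffix ≤ limit then sel0 ++ [suffix]
        else sel0
      else sel0
    if selected = [] then fallback else PySem.Str.join "\n" selected

-- ===== PRECONDITION & SPEC =====
def Spec_build_field_value (lines : List String) (fallback : String) (limit : Int) (out : String) : Prop := out = build_field_value_alt lines fallback limit
instance (lines : List String) (fallback : String) (limit : Int) (out : String) : Decidable (Spec_build_field_value lines fallback limit out) := by unfold Spec_build_field_value; infer_instance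

-- ===== CLAIM (what is proved, stated in full; the proofs are below) =====
def Claim_equal_build_field_value : Prop := ∀ (lines : List String) (fallback : String) (limit : Int), Dom_build_field_value lines fallback limit → Spec_build_field_value lines fallback limit (build_field_value lines fallback limit)

-- ===== LEMMAS AND PROOFS =====

-- joined length of a list of strings with "\n"
def jl (sel : List String) : Int := PySem.Str.len (PySem.Str.join "\n" sel)

-- the cum value corresponding to state sel of A's loop
def cumOf (sel : List String) : Int := if sel = [] then 0 else jl sel + 1

-- number of further lines that fit, in cum coordinates (target t = limit + 1)
def cntFit (t : Int) : Int → List String → Nat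
  | _, [] => 0
  | c, l :: rest => if c + PySem.Str.len l + 1 ≤ t then cntFit t (c + PySem.Str.len l + 1) rest + 1 else 0

-- reference result of A's loop
def refSel (limit total s : Int) (sel rest : List String) (c : Nat) : List String :=
  let selected := sel ++ rest.take c
  if c = rest.length then selected
  else
    let suffix := "- ... e mais " ++ PySem.Int.toStr (total - (s + c)) ++ " linha(s)"
    if selected ≠ [] ∧ PySem.Str.len (PySem.Str.join "\n" (selected ++ [suffix])) ≤ limit then
      selected ++ [suffix]
    else selected


theorem jl_nil : jl [] = 0 := by
  simp [jl, PySem.Chars.join_nil]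

theorem jl_singleton (a : String) : jl [a] = PySem.Str.len a := by
  simp [jl, PySem.Chars.join_singleton]

theorem jl_cons (a : String) (s : List String) (h : s ≠ []) :
    jl (a :: s) = PySem.Str.len a + 1 + jl s := by
  obtain ⟨b, s', rfl⟩ := List.exists_cons_of_ne_nil h
  simp [jl, PySem.Chars.join_cons_cons]
  ring

theorem jl_append_singleton (sel : List String) (x : String) (h : sel ≠ []) :
    jl (sel ++ [x]) = jl sel + 1 + PySem.Str.len x := by
  induction sel with
  | nil => exact absurd rfl h
  | cons a s ih =>
    cases s with
    | nil =>
      rw [show ([a] ++ [x]) = a :: [x] from rfl, jl_cons a [x] (by simp)]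
      rw [jl_singleton, jl_singleton]
    | cons b s' =>
      rw [List.cons_append, jl_cons a ((b :: s') ++ [x]) (by simp), jl_cons a (b :: s') (by simp),
        ih (by simp)]
      ring

theorem str_len_nonneg (s : String) : 0 ≤ PySem.Str.len s := by simp

theorem cumOf_append (sel : List String) (l : String) :
    cumOf (sel ++ [l]) = cumOf sel + PySem.Str.len l + 1 := by
  by_cases h : sel = []
  · subst h; simp [cumOf, jl_singleton]
  · simp [cumOf, h, jl_append_singleton sel l h]

theorem jl_update (sel : List String) (l : String) :
    jl sel + (PySem.Str.len l + if sel = [] then 0 else 1) = jl (sel ++ [l]) := by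
  by_cases h : sel = []
  · subst h; simp [jl_nil, jl_singleton]
  · rw [if_neg h, jl_append_singleton sel l h]; ring

theorem cond_iff (sel : List String) (l : String) (limit : Int) :
    (jl sel + (PySem.Str.len l + if sel = [] then 0 else 1) > limit) ↔
      ¬(cumOf sel + PySem.Str.len l + 1 ≤ limit + 1) := by
  by_cases h : sel = []
  · subst h; simp [jl_nil, cumOf]
  · rw [if_neg h, cumOf, if_neg h]; omega

theorem refSel_shift (limit total s : Int) (sel : List String) (l : String) (rs : List String) (c : Nat) :
    refSel limit total s sel (l :: rs) (c + 1) = refSel limit total (s + 1) (sel ++ [l]) rs c := by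
  have e2 : total - (s + ((c : Nat) + 1 : Int)) = total - (s + 1 + (c : Int)) := by ring
  unfold refSel
  simp only [List.take_succ_cons, List.length_cons, Nat.add_right_cancel_iff, List.append_assoc,
    List.cons_append, List.nil_append, Nat.cast_add, Nat.cast_one]
  rw [e2]

theorem loopA_eq (limit total : Int) (rest : List String) : ∀ (s : Int) (sel : List String),
    bfvLoopA limit total (PySem.List.enumerate rest s) sel (jl sel) =
      refSel limit total s sel rest (cntFit (limit + 1) (cumOf sel) rest) := by
  induction rest with
  | nil =>
    intro s sel
    simp [PySem.List.enumerate_nil, bfvLoopA, refSel, cntFit]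
  | cons l rs ih =>
    intro s sel
    rw [PySem.List.enumerate_cons]
    simp only [bfvLoopA]
    by_cases hc : cumOf sel + PySem.Str.len l + 1 ≤ limit + 1
    · rw [if_neg (by rw [cond_iff]; exact not_not_intro hc)]
      rw [jl_update, ih (s + 1) (sel ++ [l])]
      have hcnt : cntFit (limit + 1) (cumOf sel) (l :: rs) =
          cntFit (limit + 1) (cumOf (sel ++ [l])) rs + 1 := by
        rw [cntFit, if_pos hc, cumOf_append]
      rw [hcnt, refSel_shift]
    · rw [if_pos ((cond_iff sel l limit).mpr hc)]
      have hcnt : cntFit (limit + 1) (cumOf sel) (l :: rs) = 0 := by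
        rw [cntFit, if_neg hc]
      rw [hcnt]
      simp [refSel]

theorem cntFit_le_length (t : Int) (c : Int) (lines : List String) :
    cntFit t c lines ≤ lines.length := by
  induction lines generalizing c with
  | nil => simp [cntFit]
  | cons l rs ih =>
    rw [cntFit]
    split_ifs with h
    · have := ih (c + PySem.Str.len l + 1)
      simp only [List.length_cons]
      omega
    · simp

theorem cntFit_eq_takeWhile (t : Int) (c : Int) (lines : List String) :
    cntFit t c lines = ((bfvCum lines c).takeWhile (fun x => decide (x ≤ t))).length := by
  induction lines generalizing c with
  | nil => simp [cntFit, bfvCum]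
  | cons l rs ih =>
    rw [cntFit, bfvCum]
    simp only [List.takeWhile_cons, decide_eq_true_eq]
    by_cases h : c + PySem.Str.len l + 1 ≤ t
    · rw [if_pos h, if_pos h, ih, List.length_cons]
    · rw [if_neg h, if_neg h, List.length_nil]

theorem length_bfvCum (lines : List String) (c : Int) : (bfvCum lines c).length = lines.length := by
  induction lines generalizing c with
  | nil => simp [bfvCum]
  | cons l rs ih => simp [bfvCum, ih]

theorem bfvCum_lt (lines : List String) (c : Int) : ∀ x ∈ bfvCum lines c, c < x := by
  induction lines generalizing c with
  | nil => simp [bfvCum]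
  | cons l rs ih =>
    intro x hx
    rw [bfvCum] at hx
    simp only [List.mem_cons] at hx
    have hnn := str_len_nonneg l
    rcases hx with rfl | hx
    · omega
    · have := ih (c + PySem.Str.len l + 1) x hx
      omega

theorem bfvCum_sorted (lines : List String) (c : Int) : (bfvCum lines c).Pairwise (· ≤ ·) := by
  induction lines generalizing c with
  | nil => simp [bfvCum]
  | cons l rs ih =>
    rw [bfvCum]
    refine List.pairwise_cons.mpr ⟨fun y hy => ?_, ih _⟩
    exact le_of_lt (bfvCum_lt rs _ y hy)

theorem bfvCum_getElem (lines : List String) : ∀ (k : Nat) (c : Int) (h : k < lines.length),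
    (bfvCum lines c)[k]'(by rw [length_bfvCum]; exact h) = c + jl (lines.take (k + 1)) + 1 := by
  induction lines with
  | nil => intro k c h; exact absurd h (by simp)
  | cons l rs ih =>
    intro k c h
    cases k with
    | zero =>
      simp [bfvCum, jl_singleton]
    | succ k =>
      have hk : k < rs.length := by simpa using h
      have hrs : rs ≠ [] := by intro h0; subst h0; simp at hk
      simp only [bfvCum, List.getElem_cons_succ]
      rw [ih k (c + PySem.Str.len l + 1) hk, List.take_succ_cons,
        jl_cons l (rs.take (k + 1)) (by simp [List.take_eq_nil_iff, hrs])]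
      ring

theorem takeWhile_length_of (cum : List Int) (P : Int → Bool) (k : Nat) (hk : k ≤ cum.length)
    (h1 : ∀ (i : Nat) (h : i < cum.length), i < k → P cum[i] = true)
    (h2 : ∀ (i : Nat) (h : i < cum.length), k ≤ i → P cum[i] = false) :
    (cum.takeWhile P).length = k := by
  induction cum generalizing k with
  | nil => simp only [List.length_nil] at hk; simp only [List.takeWhile_nil, List.length_nil]; omega
  | cons a l ih =>
    cases k with
    | zero =>
      have ha : P a = false := h2 0 (by simp) (Nat.le_refl 0)
      simp [ha]
    | succ k =>
      have ha : P a = true := h1 0 (by simp) (by omega)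
      simp only [List.takeWhile_cons, ha, if_true, List.length_cons]
      rw [ih k (by simpa using hk)
        (fun i h hi => h1 (i + 1) (by simpa using h) (by omega))
        (fun i h hi => h2 (i + 1) (by simpa using h) (by omega))]

theorem bfvSearch_succ (cum : List Int) (t : Int) (fuel : Nat) (lo hi : Int) :
    bfvSearch cum t (fuel + 1) lo hi =
      if lo < hi then
        (if PySem.List.pyGetD cum (PySem.Int.floordiv (lo + hi) 2) 0 ≤ t then
          bfvSearch cum t fuel (PySem.Int.floordiv (lo + hi) 2 + 1) hi
        else bfvSearch cum t fuel lo (PySem.Int.floordiv (lo + hi) 2))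
      else lo := rfl

theorem takeWhile_len_final (cum : List Int) (t : Int) (lo : Int) (h0 : 0 ≤ lo)
    (hlen : lo ≤ (cum.length : Int))
    (hlow : ∀ (i : Nat) (h : i < cum.length), (i : Int) < lo → cum[i] ≤ t)
    (hhigh : ∀ (i : Nat) (h : i < cum.length), lo ≤ (i : Int) → t < cum[i]) :
    lo = ((cum.takeWhile (fun x => decide (x ≤ t))).length : Int) := by
  rw [takeWhile_length_of cum (fun x => decide (x ≤ t)) lo.toNat (by omega)
    (fun i h hi => by simp only [decide_eq_true_eq]; exact hlow i h (by omega))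
    (fun i h hi => by
      simp only [decide_eq_false_iff_not, not_le]
      exact hhigh i h (by omega))]
  omega

theorem search_spec (cum : List Int) (t : Int) (hs : cum.Pairwise (· ≤ ·)) :
    ∀ (fuel : Nat) (lo hi : Int), 0 ≤ lo → lo ≤ hi → hi ≤ (cum.length : Int) →
    hi - lo ≤ (fuel : Int) →
    (∀ (i : Nat) (h : i < cum.length), (i : Int) < lo → cum[i] ≤ t) →
    (∀ (i : Nat) (h : i < cum.length), hi ≤ (i : Int) → t < cum[i]) →
    bfvSearch cum t fuel lo hi = ((cum.takeWhile (fun x => decide (x ≤ t))).length : Int) := by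
  intro fuel
  induction fuel with
  | zero =>
    intro lo hi h0 hlh hhlen hfuel hlow hhigh
    have heq : lo = hi := by omega
    subst heq
    exact takeWhile_len_final cum t lo h0 hhlen hlow hhigh
  | succ fuel ih =>
    intro lo hi h0 hlh hhlen hfuel hlow hhigh
    rw [bfvSearch_succ]
    by_cases hlt : lo < hi
    · rw [if_pos hlt]
      obtain ⟨hm1, hm2⟩ := PySem.Int.floordiv_two_mid_bounds hlh
      set mid := PySem.Int.floordiv (lo + hi) 2 with hmiddef
      have hmidlt : mid < hi := by
        rw [hmiddef, PySem.Int.floordiv_lt_iff_lt_mul (by norm_num)]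
        omega
      have hmidnn : 0 ≤ mid := le_trans h0 hm1
      have hmidlen : mid < (cum.length : Int) := lt_of_lt_of_le hmidlt hhlen
      have hmidnat : mid.toNat < cum.length := by omega
      have hget : PySem.List.pyGetD cum mid 0 = cum[mid.toNat]'hmidnat := by
        conv_lhs => rw [show mid = ((mid.toNat : Nat) : Int) from by omega,
          PySem.List.pyGetD_natCast]
        exact List.getD_eq_getElem _ _ hmidnat
      simp only [hget]
      have hpair := List.pairwise_iff_getElem.mp hs
      by_cases hcm : cum[mid.toNat]'hmidnat ≤ t
      · rw [if_pos hcm]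
        refine ih (mid + 1) hi (by omega) (by omega) hhlen (by omega) ?_ hhigh
        intro i h hi2
        by_cases hio : (i : Int) < lo
        · exact hlow i h hio
        · have hile : i ≤ mid.toNat := by omega
          rcases Nat.lt_or_ge i mid.toNat with hlt2 | hge
          · exact le_trans (hpair i mid.toNat h hmidnat hlt2) hcm
          · have : i = mid.toNat := by omega
            subst this; exact hcm
      · rw [if_neg hcm]
        refine ih lo mid h0 (by omega) (by omega) (by omega) hlow ?_
        intro i h hi2
        rw [not_le] at hcm
        rcases Nat.lt_or_ge mid.toNat i with hlt2 | hge
        · exact lt_of_lt_of_le hcm (hpair mid.toNat i hmidnat h hlt2)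
        · have : i = mid.toNat := by omega
          subst this; exact hcm
    · rw [if_neg hlt]
      have heq : lo = hi := by omega
      subst heq
      exact takeWhile_len_final cum t lo h0 hhlen hlow hhigh

theorem search_full (lines : List String) (t : Int) :
    bfvSearch (bfvCum lines 0) t lines.length 0 (PySem.List.len lines) = (cntFit t 0 lines : Int) := by
  have hlen : ((bfvCum lines 0).length : Int) = (lines.length : Int) := by
    rw [length_bfvCum]
  have h := search_spec (bfvCum lines 0) t (bfvCum_sorted lines 0) lines.length 0
    (lines.length : Int) (le_refl 0) (by positivity) (by omega) (by omega)
    (fun i h hi => absurd hi (by omega))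
    (fun i h hi => absurd hi (by rw [length_bfvCum] at h; omega))
  rw [show PySem.List.len lines = (lines.length : Int) from by simp, h,
    cntFit_eq_takeWhile t 0 lines]

theorem take_ne_nil (lines : List String) (c : Nat) (hc : 0 < c) (h : lines ≠ []) :
    lines.take c ≠ [] := by
  simp [List.take_eq_nil_iff, h]
  omega

-- ===== VERDICT (by name: the statement is the Claim_ definition above) =====
theorem build_field_value_spec : Claim_equal_build_field_value := by
  intro lines fallback limit _
  unfold Spec_build_field_value
  by_cases hnil : lines = []
  · subst hnil; rfl
  · have hA0 := loopA_eq limit (PySem.List.len lines) lines 0 []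
    rw [jl_nil, show cumOf [] = 0 from by simp [cumOf]] at hA0
    simp only [build_field_value, build_field_value_alt]
    rw [if_neg hnil, if_neg hnil, hA0, search_full lines (limit + 1),
      PySem.List.slice_to lines (Int.natCast_nonneg _)]
    simp only [Int.toNat_natCast]
    rw [show PySem.List.len lines = ((lines.length : Nat) : Int) from by simp]
    have hcn : cntFit (limit + 1) 0 lines ≤ lines.length := cntFit_le_length _ _ _
    generalize hcdef : cntFit (limit + 1) 0 lines = c at *
    by_cases hceq : c = lines.length
    · subst hceq
      rw [show refSel limit ((lines.length : Nat) : Int) 0 [] lines lines.length = lines from by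
        simp [refSel]]
      rw [if_neg (show ¬((lines.length : Int) < (lines.length : Int) ∧
        lines.take lines.length ≠ []) from by simp)]
      simp [hnil]
    · have hclt : c < lines.length := by omega
      by_cases hc0 : c = 0
      · subst hc0
        have hlen0 : ¬((0 : Nat) = lines.length) := by omega
        rw [show refSel limit ((lines.length : Nat) : Int) 0 [] lines 0 = [] from by
          simp [refSel, hlen0]]
        rw [if_neg (show ¬(((0 : Nat) : Int) < (lines.length : Int) ∧
          lines.take 0 ≠ []) from by simp)]
        simp
      · have hc1 : 0 < c := Nat.pos_of_ne_zero hc0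
        have htk : lines.take c ≠ [] := take_ne_nil lines c hc1 hnil
        have hcum : PySem.List.pyGetD (bfvCum lines 0) ((c : Int) - 1) 0 = jl (lines.take c) + 1 := by
          rw [show ((c : Int) - 1) = ((c - 1 : Nat) : Int) from by omega, PySem.List.pyGetD_natCast,
            List.getD_eq_getElem _ _ (by rw [length_bfvCum]; omega),
            bfvCum_getElem lines (c - 1) 0 (by omega),
            show c - 1 + 1 = c from by omega]
          ring
        simp only [refSel]
        rw [if_neg (by omega : ¬ c = lines.length)]
        simp only [List.nil_append, zero_add]
        rw [show PySem.Str.len (PySem.Str.join "\n" (lines.take c ++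
            ["- ... e mais " ++ PySem.Int.toStr (((lines.length : Nat) : Int) - (c : Int)) ++ " linha(s)"])) =
          jl (lines.take c) + 1 + PySem.Str.len ("- ... e mais " ++
            PySem.Int.toStr (((lines.length : Nat) : Int) - (c : Int)) ++ " linha(s)") from by
          rw [show ∀ X : List String, PySem.Str.len (PySem.Str.join "\n" X) = jl X from fun _ => rfl,
            jl_append_singleton _ _ htk]]
        rw [if_pos (⟨by exact_mod_cast hclt, htk⟩ :
          ((c : Int) < ((lines.length : Nat) : Int) ∧ lines.take c ≠ []))]
        rw [hcum]
        simp only [ne_eq, htk, not_false_eq_true, true_and]
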